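-- pv_equiv track=rewrite | github.com/DDMAL/linkedmusic-datalake | shared/nlq2sparql/tools/wikidata_tool.py | _pick_best_candidate
-- ===== SOURCE A (Python) =====
-- from typing import Dict, Optional, Sequence
--
-- def _pick_best_candidate(term: str, candidates: Sequence[Dict]) -> Optional[str]:
--     if not candidates:
--         return None
--     term_lower = term.lower().strip()
--     norm = []
--     for c in candidates:
--         cid = c.get("id") or ""
--         label = c.get("label") or c.get("snippet") or ""
--         if cid and label:
--             norm.append((cid, label))
--     if not norm:
--         return None
--     for cid, label in norm:
--         if label.lower() == term_lower:
--             return cid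
--     for cid, label in norm:
--         if label.lower().startswith(term_lower):
--             return cid
--     return norm[0][0]
-- ===== SOURCE B (Python) =====
-- from typing import Dict, Optional, Sequence
--
--
-- def _pick_best_candidate(term: str, candidates: Sequence[Dict]) -> Optional[str]:
--     term_lower = term.lower().strip()
--     exact = prefix = first = None
--     for c in candidates:
--         cid = c.get("id") or ""
--         label = c.get("label") or c.get("snippet") or ""
--         if not (cid and label):
--             continue
--         if first is None:
--             first = cid
--         ll = label.lower()
--         if exact is None and ll == term_lower:
--             exact = cid
--         if prefix is None and ll.startswith(term_lower):
--             prefix = cid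
--     return exact or prefix or first
-- ===== Notes on version B (the rewrite author's own statement) =====
-- stated objective: alternative
-- what changed: A builds a normalized list and then runs two separate exact/prefix scans plus a fallback; B makes one single pass over the raw candidates without building any intermediate list, maintaining three best-so-far accumulators (first exact, first prefix, first valid) and returning their priority chain at the end.
import Mathlib
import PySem

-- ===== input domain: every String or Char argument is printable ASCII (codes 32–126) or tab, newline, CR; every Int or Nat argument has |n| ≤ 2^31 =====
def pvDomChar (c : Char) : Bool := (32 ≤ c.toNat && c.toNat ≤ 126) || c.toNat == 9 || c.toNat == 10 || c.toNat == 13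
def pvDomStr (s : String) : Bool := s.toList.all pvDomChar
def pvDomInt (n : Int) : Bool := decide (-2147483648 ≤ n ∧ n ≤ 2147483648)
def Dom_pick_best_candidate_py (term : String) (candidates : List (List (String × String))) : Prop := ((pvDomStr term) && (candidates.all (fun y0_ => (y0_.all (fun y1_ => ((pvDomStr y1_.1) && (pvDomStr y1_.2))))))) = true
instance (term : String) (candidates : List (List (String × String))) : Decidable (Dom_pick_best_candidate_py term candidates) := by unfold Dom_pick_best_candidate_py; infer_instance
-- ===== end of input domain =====

-- B replaces A's normalized-list build plus two exact/prefix scans by one pass over the raw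
-- candidates keeping three best-so-far accumulators (objective: alternative decomposition, same cost).


-- ===== PORT A =====
-- `d.get(k)` on the association list (first match, dict convention), then `or ""`
def pvGetOr (c : List (String × String)) (k : String) : String :=
  ((PySem.Dict.mk c).get? k).getD ""

-- `label = c.get("label") or c.get("snippet") or ""` (falsy chaining on empty strings)
def pvLabelOf (c : List (String × String)) : String :=
  let l := pvGetOr c "label"
  if l ≠ "" then l else pvGetOr c "snippet"

-- A's norm-building loop ('for c in candidates: … if cid and label: norm.append(...)')
def pbcNormA (candidates : List (List (String × String))) : List (String × String) :=
  candidates.foldl (fun acc c =>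
    let cid := pvGetOr c "id"
    let label := pvLabelOf c
    if cid ≠ "" ∧ label ≠ "" then acc ++ [(cid, label)] else acc) []

-- A's first scan: 'for cid, label in norm: if label.lower() == term_lower: return cid'
def pbcScanExact (tl : String) : List (String × String) → Option String
  | [] => none
  | (cid, label) :: rest =>
    if PySem.Str.lower label = tl then some cid else pbcScanExact tl rest

-- A's second scan: 'for cid, label in norm: if label.lower().startswith(term_lower): return cid'
def pbcScanPrefix (tl : String) : List (String × String) → Option String
  | [] => none
  | (cid, label) :: rest =>
    if PySem.Str.startswith (PySem.Str.lower label) tl then some cid else pbcScanPrefix tl rest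

def pick_best_candidate_py (term : String) (candidates : List (List (String × String))) : Option String :=
  if candidates = [] then none
  else
    let term_lower := PySem.Str.strip (PySem.Str.lower term)
    let norm := pbcNormA candidates
    if norm = [] then none
    else
      match pbcScanExact term_lower norm with
      | some cid => some cid
      | none =>
        match pbcScanPrefix term_lower norm with
        | some cid => some cid
        | none => norm.head?.map Prod.fst

-- ===== PORT B =====
-- B's loop body: update the (exact, prefix, first) best-so-far accumulators with one raw candidate
def pbcStep (tl : String) (st : Option String × Option String × Option String)
    (c : List (String × String)) : Option String × Option String × Option String :=
  let cid := pvGetOr c "id"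
  let label := pvLabelOf c
  if cid ≠ "" ∧ label ≠ "" then
    let ll := PySem.Str.lower label
    (if st.1 = none ∧ ll = tl then some cid else st.1,
     if st.2.1 = none ∧ PySem.Str.startswith ll tl then some cid else st.2.1,
     if st.2.2 = none then some cid else st.2.2)
  else st

def pick_best_candidate_py_alt (term : String) (candidates : List (List (String × String))) : Option String :=
  let term_lower := PySem.Str.strip (PySem.Str.lower term)
  let st := candidates.foldl (pbcStep term_lower) (none, none, none)
  st.1.or (st.2.1.or st.2.2)

-- ===== PRECONDITION & SPEC =====
def Spec_pick_best_candidate_py (term : String) (candidates : List (List (String × String))) (out : Option String) : Prop := out = pick_best_candidate_py_alt term candidates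
instance (term : String) (candidates : List (List (String × String))) (out : Option String) : Decidable (Spec_pick_best_candidate_py term candidates out) := by unfold Spec_pick_best_candidate_py; infer_instance

-- ===== CLAIM (what is proved, stated in full; the proofs are below) =====
def Claim_equal_pick_best_candidate_py : Prop := ∀ (term : String) (candidates : List (List (String × String))), Dom_pick_best_candidate_py term candidates → Spec_pick_best_candidate_py term candidates (pick_best_candidate_py term candidates)

-- ===== LEMMAS AND PROOFS =====

-- the triple-accumulator step restricted to an already-normalized (cid, label) pair
def pbcStepN (tl : String) (st : Option String × Option String × Option String)
    (p : String × String) : Option String × Option String × Option String :=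
  let ll := PySem.Str.lower p.2
  (if st.1 = none ∧ ll = tl then some p.1 else st.1,
   if st.2.1 = none ∧ PySem.Str.startswith ll tl then some p.1 else st.2.1,
   if st.2.2 = none then some p.1 else st.2.2)

-- recursive form of A's normalized list
def pbcNormR : List (List (String × String)) → List (String × String)
  | [] => []
  | c :: rest =>
    if pvGetOr c "id" ≠ "" ∧ pvLabelOf c ≠ "" then (pvGetOr c "id", pvLabelOf c) :: pbcNormR rest
    else pbcNormR rest

lemma pbcNormA_eq (cs : List (List (String × String))) : pbcNormA cs = pbcNormR cs := by
  suffices h : ∀ (cs : List (List (String × String))) (acc : List (String × String)),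
      cs.foldl (fun acc c =>
        let cid := pvGetOr c "id"
        let label := pvLabelOf c
        if cid ≠ "" ∧ label ≠ "" then acc ++ [(cid, label)] else acc) acc = acc ++ pbcNormR cs by
    simpa using h cs []
  intro cs
  induction cs with
  | nil => simp [pbcNormR]
  | cons c rest ih =>
    intro acc
    simp only [List.foldl_cons, pbcNormR]
    split_ifs with h
    · simp [ih]
    · simp [ih]

-- folding B's step over the raw candidates = folding the normalized step over the normalized list
lemma foldl_step_normR (tl : String) (cs : List (List (String × String)))
    (st : Option String × Option String × Option String) :
    (pbcNormR cs).foldl (pbcStepN tl) st = cs.foldl (pbcStep tl) st := by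
  induction cs generalizing st with
  | nil => simp [pbcNormR]
  | cons c rest ih =>
    simp only [pbcNormR, List.foldl_cons]
    split_ifs with h
    · simp only [List.foldl_cons, ih]
      congr 1
      simp [pbcStep, pbcStepN, h]
    · rw [ih]
      congr 1
      simp [pbcStep, h]

-- the fold of the normalized step computes (first exact, first prefix, first id), each
-- seeded by the incoming accumulator (earlier hits win)
lemma foldl_stepN_eq (tl : String) (norm : List (String × String))
    (st : Option String × Option String × Option String) :
    norm.foldl (pbcStepN tl) st
      = (st.1.or (pbcScanExact tl norm),
         st.2.1.or (pbcScanPrefix tl norm),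
         st.2.2.or (norm.head?.map Prod.fst)) := by
  induction norm generalizing st with
  | nil => obtain ⟨ex, pf, fs⟩ := st; simp [pbcScanExact, pbcScanPrefix]
  | cons p rest ih =>
    obtain ⟨cid, label⟩ := p
    obtain ⟨ex, pf, fs⟩ := st
    simp only [List.foldl_cons, ih, pbcStepN, pbcScanExact, pbcScanPrefix]
    cases ex <;> cases pf <;> cases fs <;> split_ifs <;> simp_all

-- ===== VERDICT (by name: the statement is the Claim_ definition above) =====
theorem pick_best_candidate_py_spec : Claim_equal_pick_best_candidate_py := by
  intro term candidates _
  unfold Spec_pick_best_candidate_py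
  set tl := PySem.Str.strip (PySem.Str.lower term) with htl
  have hfold : candidates.foldl (pbcStep tl) (none, none, none)
      = (pbcNormA candidates).foldl (pbcStepN tl) (none, none, none) := by
    rw [pbcNormA_eq]; exact (foldl_step_normR tl candidates _).symm
  have hB : pick_best_candidate_py_alt term candidates
      = ((pbcScanExact tl (pbcNormA candidates)).or
          ((pbcScanPrefix tl (pbcNormA candidates)).or
            ((pbcNormA candidates).head?.map Prod.fst))) := by
    simp only [pick_best_candidate_py_alt, ← htl, hfold, foldl_stepN_eq]
    simp
  rw [hB]
  simp only [pick_best_candidate_py, ← htl]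
  by_cases hc : candidates = []
  · subst hc; simp [pbcNormA, pbcScanExact, pbcScanPrefix]
  · simp only [hc, if_false]
    by_cases hn : pbcNormA candidates = []
    · simp [hn, pbcScanExact, pbcScanPrefix]
    · simp only [hn, if_false]
      cases pbcScanExact tl (pbcNormA candidates) <;>
        cases pbcScanPrefix tl (pbcNormA candidates) <;> simp
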